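-- pv_equiv track=rewrite | github.com/Staryo40/Recursion-Mountain-Training | Other/CoinChange.py | subCoinCombination
-- ===== SOURCE A (Python) =====
-- def subCoinCombination(coins, targetSum, currentSet) -> list[list[int]]:
--     if (sumOfList(currentSet) == targetSum):
--         return [currentSet]
--     elif (sumOfList(currentSet) < targetSum):
--         res = []
--         lastCoin = currentSet[len(currentSet)-1]
--         for i in range(len(coins)):
--             if (coins[i] <= lastCoin):
--                 newList = currentSet.copy()
--                 newList.append(coins[i])
--                 res += subCoinCombination(coins, targetSum, newList)
--         return res
--     else: # currentSet sum is bigger than targetSum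
--         return []
--
-- def sumOfList(l) -> int:
--     sum = 0
--     for i in range(len(l)):
--         sum += l[i]
--     return sum
-- ===== SOURCE B (Python) =====
-- def subCoinCombination(coins, targetSum, currentSet) -> list[list[int]]:
--     results = []
--     stack = [currentSet]
--     while stack:
--         node = stack.pop()
--         s = sum(node)
--         if s == targetSum:
--             results.append(node)
--         elif s < targetSum:
--             lastCoin = node[-1]
--             children = [node + [c] for c in coins if c <= lastCoin]
--             stack.extend(reversed(children))
--     return results
-- ===== Notes on version B (the rewrite author's own statement) =====
-- stated objective: alternative
-- what changed: Replaces A's recursive DFS (with per-node index loop and list-copy appends) by an iterative explicit-stack loop that pops nodes, appends solutions to an accumulator, and pushes the children in reversed order to preserve A's left-to-right DFS output order.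
import Mathlib
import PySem

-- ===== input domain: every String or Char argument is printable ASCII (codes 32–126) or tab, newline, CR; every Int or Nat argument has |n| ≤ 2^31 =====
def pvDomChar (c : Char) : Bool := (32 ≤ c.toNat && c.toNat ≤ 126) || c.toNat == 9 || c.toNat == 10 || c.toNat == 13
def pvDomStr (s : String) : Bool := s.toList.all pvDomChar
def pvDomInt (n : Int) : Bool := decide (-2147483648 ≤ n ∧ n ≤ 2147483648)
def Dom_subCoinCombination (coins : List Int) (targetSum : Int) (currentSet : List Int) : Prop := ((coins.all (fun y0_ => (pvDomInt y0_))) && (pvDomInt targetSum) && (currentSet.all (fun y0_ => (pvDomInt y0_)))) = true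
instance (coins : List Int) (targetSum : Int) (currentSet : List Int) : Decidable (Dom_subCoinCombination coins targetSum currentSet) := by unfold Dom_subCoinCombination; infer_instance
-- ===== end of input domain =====

-- B replaces A's recursive DFS by an explicit-stack iterative DFS (children pushed in
-- reversed order to keep A's left-to-right output order); same results, no recursion.

-- ===== PORT A =====

-- 'sum = 0; for i in range(len(l)): sum += l[i]; return sum'
def sumOfList (l : List Int) : Int :=
  (PySem.List.pyRange 0 (l.length : Int) 1).foldl
    (fun s i => s + PySem.List.pyGetD l i 0) 0

-- A's recursion diverges in Python when a nonpositive coin is eligible (it re-selects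
-- itself forever) and its loop only runs when sum < targetSum; the extra conjuncts
-- '0 < c ∧ sumOfList currentSet < targetSum' in the guard below are termination guards
-- only: wherever the Python returns (i.e. under Pre_), both already hold at this point,
-- so they never alter the computed value.  The 'for i in range(len(coins))' loop is
-- transliterated as recursion over the remaining coins in index order (subLoopA).
theorem sumOfList_eq_sum (l : List Int) : sumOfList l = l.sum := by
  rw [sumOfList, PySem.List.foldl_pyRange_zero_pyGetD' l 0 (fun (a x : Int) => a + x) 0]
  exact List.sum_eq_foldl.symm

mutual
def subCoinCombination (coins : List Int) (targetSum : Int) (currentSet : List Int) : List (List Int) :=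
  if sumOfList currentSet = targetSum then [currentSet]
  else if sumOfList currentSet < targetSum then
    subLoopA coins targetSum currentSet
      ((PySem.List.pyGet? currentSet ((currentSet.length : Int) - 1)).getD 0)
      coins []
  else []
termination_by ((targetSum - currentSet.sum).toNat, coins.length + 1)
decreasing_by
  exact Prod.Lex.right _ (Nat.lt_succ_self _)

def subLoopA (coins : List Int) (targetSum : Int) (currentSet : List Int)
    (lastCoin : Int) (rem : List Int) (res : List (List Int)) : List (List Int) :=
  match rem with
  | [] => res
  | c :: cs =>
    if c ≤ lastCoin ∧ 0 < c ∧ sumOfList currentSet < targetSum then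
      subLoopA coins targetSum currentSet lastCoin cs
        (res ++ subCoinCombination coins targetSum (currentSet ++ [c]))
    else
      subLoopA coins targetSum currentSet lastCoin cs res
termination_by ((targetSum - currentSet.sum).toNat, rem.length)
decreasing_by
  · apply Prod.Lex.left
    rw [sumOfList_eq_sum] at *
    simp only [List.sum_append, List.sum_cons, List.sum_nil]
    omega
  · exact Prod.Lex.right _ (Nat.lt_succ_self _)
  · exact Prod.Lex.right _ (Nat.lt_succ_self _)
end

-- ===== PORT B =====

-- weight of a stack node: strictly dominates the total weight of its children,
-- used only as the termination measure of the stack loop below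
def pvNodeW (coins : List Int) (targetSum : Int) (node : List Int) : Nat :=
  (coins.length + 2) ^ ((targetSum - node.sum).toNat + 1)

-- '[node + [c] for c in coins if c <= lastCoin]' (plus the termination guard '0 < c',
-- see the comment on loopB)
def pvChildrenOf (coins : List Int) (node : List Int) : List (List Int) :=
  (coins.filter (fun c => decide (c ≤ (PySem.List.pyGet? node (-1)).getD 0) && decide (0 < c))).map
    (fun c => node ++ [c])

def pvStackW (coins : List Int) (targetSum : Int) (stack : List (List Int)) : Nat :=
  (stack.map (pvNodeW coins targetSum)).sum

theorem pvNodeW_pos (coins : List Int) (targetSum : Int) (node : List Int) :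
    0 < pvNodeW coins targetSum node :=
  Nat.pow_pos (by omega)

theorem pvChildren_lt (coins : List Int) (targetSum : Int) (node : List Int)
    (hlt : node.sum < targetSum) :
    pvStackW coins targetSum (pvChildrenOf coins node) < pvNodeW coins targetSum node := by
  unfold pvChildrenOf
  set B := coins.length + 2 with hB
  set g := (targetSum - node.sum).toNat with hg
  have hg1 : 1 ≤ g := by omega
  have hbound : ∀ w ∈ ((coins.filter (fun c => decide (c ≤ (PySem.List.pyGet? node (-1)).getD 0) && decide (0 < c))).map
      (fun c => node ++ [c])).map (pvNodeW coins targetSum), w ≤ B ^ g := by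
    intro w hw
    simp only [List.map_map, List.mem_map, Function.comp] at hw
    obtain ⟨c, hc, rfl⟩ := hw
    have hcpos : 0 < c := by
      have := List.of_mem_filter hc
      simp at this; exact this.2
    have : (targetSum - (node ++ [c]).sum).toNat + 1 ≤ g := by
      simp only [List.sum_append, List.sum_cons, List.sum_nil]
      omega
    exact Nat.pow_le_pow_right (by omega) this
  have hlen : ((coins.filter (fun c => decide (c ≤ (PySem.List.pyGet? node (-1)).getD 0) && decide (0 < c))).map
      (fun c => node ++ [c])).length ≤ coins.length := by
    simp only [List.length_map]
    exact List.length_filter_le _ _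
  calc pvStackW coins targetSum _
      ≤ _ • (B ^ g) := List.sum_le_card_nsmul _ _ hbound
    _ ≤ coins.length * B ^ g := by
        simp only [smul_eq_mul, List.length_map]
        exact Nat.mul_le_mul_right _ (by simpa using hlen)
    _ < B * B ^ g := by
        exact (Nat.mul_lt_mul_right (Nat.pow_pos (by omega))).mpr (by omega)
    _ = pvNodeW coins targetSum node := by
        rw [pvNodeW, ← hB, ← hg, pow_succ, Nat.mul_comm]

-- 'while stack: node = stack.pop(); …' — head of the list is the top of Python's stack,
-- 'stack.extend(reversed(children))' becomes 'children ++ rest'.  The '&& decide (0 < c)'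
-- conjunct in the filter is a termination guard only: wherever the Python returns
-- (i.e. under Pre_), every coin with c ≤ lastCoin is positive, so it never alters the value.
def loopB (coins : List Int) (targetSum : Int) (stack : List (List Int))
    (results : List (List Int)) : List (List Int) :=
  match stack with
  | [] => results
  | node :: rest =>
    if node.sum = targetSum then
      loopB coins targetSum rest (results ++ [node])
    else if node.sum < targetSum then
      loopB coins targetSum (pvChildrenOf coins node ++ rest) results
    else
      loopB coins targetSum rest results
termination_by pvStackW coins targetSum stack
decreasing_by
  · simp only [pvStackW, List.map_cons, List.sum_cons]
    have := pvNodeW_pos coins targetSum node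
    omega
  · simp only [pvStackW, List.map_cons, List.sum_cons, List.map_append, List.sum_append]
    have h := pvChildren_lt coins targetSum node (by assumption)
    simp only [pvStackW] at h
    omega
  · simp only [pvStackW, List.map_cons, List.sum_cons]
    have := pvNodeW_pos coins targetSum node
    omega

def subCoinCombination_alt (coins : List Int) (targetSum : Int) (currentSet : List Int) : List (List Int) :=
  loopB coins targetSum [currentSet] []

-- ===== PRECONDITION & SPEC =====

-- Pre_ excludes exactly the inputs where the Python A raises: IndexError when currentSet
-- is empty with sum 0 < targetSum, and unbounded recursion (RecursionError) when some
-- nonpositive coin is ≤ the last element of currentSet while its sum is < targetSum.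
def Pre_subCoinCombination (coins : List Int) (targetSum : Int) (currentSet : List Int) : Prop :=
  targetSum ≤ currentSet.sum ∨
    (currentSet ≠ [] ∧ ∀ c ∈ coins, c ≤ currentSet.getLastD 0 → 0 < c)
instance (coins : List Int) (targetSum : Int) (currentSet : List Int) : Decidable (Pre_subCoinCombination coins targetSum currentSet) := by unfold Pre_subCoinCombination; infer_instance

def pvWitness_subCoinCombination : List Int × Int × List Int := ([1, 2, 5], 7, [2])

def Spec_subCoinCombination (coins : List Int) (targetSum : Int) (currentSet : List Int) (out : List (List Int)) : Prop := out = subCoinCombination_alt coins targetSum currentSet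
instance (coins : List Int) (targetSum : Int) (currentSet : List Int) (out : List (List Int)) : Decidable (Spec_subCoinCombination coins targetSum currentSet out) := by unfold Spec_subCoinCombination; infer_instance

-- ===== CLAIM (what is proved, stated in full; the proofs are below) =====
def Claim_equal_subCoinCombination : Prop := ∀ (coins : List Int) (targetSum : Int) (currentSet : List Int), Dom_subCoinCombination coins targetSum currentSet → Pre_subCoinCombination coins targetSum currentSet → Spec_subCoinCombination coins targetSum currentSet (subCoinCombination coins targetSum currentSet)

-- ===== LEMMAS AND PROOFS =====

theorem pyGet?_last_eq (l : List Int) :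
    PySem.List.pyGet? l ((l.length : Int) - 1) = PySem.List.pyGet? l (-1) := by
  cases l with
  | nil => rfl
  | cons x xs =>
    rw [PySem.List.pyGet?_neg_one,
      PySem.List.pyGet?_of_nonneg _ (by simp : (0:Int) ≤ ((x::xs).length : Int) - 1),
      List.getLast?_eq_getElem?]
    congr 1
    simp

-- A's per-node loop, characterised as a flatMap over the coins list
theorem subLoopA_eq (coins : List Int) (targetSum : Int) (currentSet : List Int)
    (lastCoin : Int) (rem : List Int) (res : List (List Int)) :
    subLoopA coins targetSum currentSet lastCoin rem res =
      res ++ rem.flatMap (fun c =>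
        if c ≤ lastCoin ∧ 0 < c ∧ sumOfList currentSet < targetSum then
          subCoinCombination coins targetSum (currentSet ++ [c])
        else []) := by
  induction rem generalizing res with
  | nil => simp [subLoopA]
  | cons c cs ih =>
    rw [subLoopA]
    by_cases h : c ≤ lastCoin ∧ 0 < c ∧ sumOfList currentSet < targetSum
    · simp only [if_pos h, ih, List.flatMap_cons, List.append_assoc]
    · simp only [if_neg h, ih, List.flatMap_cons, List.nil_append]

theorem flatMap_filter_eq {a b : Type} (cs : List a) (p : a → Bool) (f : a → List b) :
    (cs.filter p).flatMap f = cs.flatMap (fun c => if p c then f c else []) := by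
  induction cs with
  | nil => rfl
  | cons d ds ih =>
    rw [List.filter_cons, List.flatMap_cons]
    by_cases h : p d <;> simp [h, ih]

-- one DFS node whose sum is still short of the target expands to its children
theorem dfs_node_eq (coins : List Int) (targetSum : Int) (node : List Int)
    (heq : ¬ node.sum = targetSum) (hlt : node.sum < targetSum) :
    subCoinCombination coins targetSum node =
      (pvChildrenOf coins node).flatMap (subCoinCombination coins targetSum) := by
  rw [subCoinCombination.eq_def, sumOfList_eq_sum, if_neg heq, if_pos hlt,
    subLoopA_eq, List.nil_append, pyGet?_last_eq, pvChildrenOf, List.flatMap_map,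
    flatMap_filter_eq]
  congr 1
  funext c
  by_cases h : c ≤ (PySem.List.pyGet? node (-1)).getD 0 ∧ 0 < c
  · rw [if_pos ⟨h.1, h.2, by rwa [sumOfList_eq_sum]⟩, if_pos (by simpa using h)]
  · rw [if_neg (by rw [sumOfList_eq_sum]; tauto), if_neg (by simpa using h)]

-- the stack loop, characterised: it flushes the whole stack through A's DFS
theorem loopB_eq (coins : List Int) (targetSum : Int) :
    ∀ (N : Nat) (stack : List (List Int)) (results : List (List Int)),
      pvStackW coins targetSum stack ≤ N →
      loopB coins targetSum stack results =
        results ++ stack.flatMap (fun n => subCoinCombination coins targetSum n) := by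
  intro N
  induction N with
  | zero =>
    intro stack results h
    cases stack with
    | nil => simp [loopB]
    | cons node rest =>
      exfalso
      have := pvNodeW_pos coins targetSum node
      simp only [pvStackW, List.map_cons, List.sum_cons, Nat.le_zero] at h
      omega
  | succ N ih =>
    intro stack results h
    cases stack with
    | nil => simp [loopB]
    | cons node rest =>
      have hrest : pvStackW coins targetSum rest ≤ N := by
        have := pvNodeW_pos coins targetSum node
        simp only [pvStackW, List.map_cons, List.sum_cons] at h ⊢
        omega
      rw [loopB]
      by_cases hq : node.sum = targetSum
      · rw [if_pos hq, ih rest _ hrest]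
        have hnode : subCoinCombination coins targetSum node = [node] := by
          rw [subCoinCombination.eq_def, sumOfList_eq_sum, if_pos hq]
        simp [List.flatMap_cons, hnode]
      · rw [if_neg hq]
        by_cases hlt : node.sum < targetSum
        · rw [if_pos hlt]
          have hch := pvChildren_lt coins targetSum node hlt
          have hstk : pvStackW coins targetSum (pvChildrenOf coins node ++ rest) ≤ N := by
            simp only [pvStackW, List.map_append, List.sum_append] at *
            simp only [List.map_cons, List.sum_cons] at h
            omega
          rw [ih _ _ hstk]
          simp [List.flatMap_append, List.flatMap_cons, dfs_node_eq coins targetSum node hq hlt]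
        · rw [if_neg hlt, ih rest _ hrest]
          have hnode : subCoinCombination coins targetSum node = [] := by
            rw [subCoinCombination.eq_def, sumOfList_eq_sum, if_neg hq, if_neg hlt]
          simp [List.flatMap_cons, hnode]

-- ===== VERDICT (by name: the statement is the Claim_ definition above) =====
theorem subCoinCombination_spec : Claim_equal_subCoinCombination := by
  intro coins targetSum currentSet _ _
  unfold Spec_subCoinCombination subCoinCombination_alt
  rw [loopB_eq coins targetSum (pvStackW coins targetSum [currentSet]) _ _ le_rfl]
  simp [List.flatMap_cons]
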